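-- pv_equiv track=rewrite | github.com/iamzieun/Programmers_highscore_kit | 백준/Gold/2573. 빙산/빙산.py | timelapse
-- ===== SOURCE A (Python) =====
-- def timelapse(N, M, G):
--     dr = [1, -1, 0, 0]
--     dc = [0, 0, 1, -1]
--     G_after = [[0] * M for _ in range(N)]
--
--     for r in range(N):
--         for c in range(M):
--             if G[r][c] > 0:
--                 lower = 0
--                 for i in range(4):
--                     nr, nc = r + dr[i], c + dc[i]
--                     if 0 <= nr < N and 0 <= nc < M:
--                         if G[nr][nc] == 0:
--                             lower += 1
--                 G_after[r][c] = max(G[r][c] - lower, 0)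
--
--     return G_after
-- ===== SOURCE B (Python) =====
-- def timelapse(N, M, G):
--     melt = [[0] * M for _ in range(N)]
--     for r in range(N):
--         for c in range(M):
--             if G[r][c] == 0:
--                 for nr, nc in ((r + 1, c), (r - 1, c), (r, c + 1), (r, c - 1)):
--                     if 0 <= nr < N and 0 <= nc < M:
--                         melt[nr][nc] += 1
--     return [[max(G[r][c] - melt[r][c], 0) if G[r][c] > 0 else 0 for c in range(M)]
--             for r in range(N)]
-- ===== Notes on version B (the rewrite author's own statement) =====
-- stated objective: alternative
-- what changed: B inverts the data flow and stages the computation: instead of A's single gather pass that, for each land cell, scans its 4 neighbours for water and writes into a preallocated output grid, B first scatters +1 contributions from every water cell onto its in-bounds neighbours into a separate melt-count grid, then builds the output in a second pure pass as max(G[r][c]-melt[r][c],0) on land cells.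
import Mathlib
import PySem

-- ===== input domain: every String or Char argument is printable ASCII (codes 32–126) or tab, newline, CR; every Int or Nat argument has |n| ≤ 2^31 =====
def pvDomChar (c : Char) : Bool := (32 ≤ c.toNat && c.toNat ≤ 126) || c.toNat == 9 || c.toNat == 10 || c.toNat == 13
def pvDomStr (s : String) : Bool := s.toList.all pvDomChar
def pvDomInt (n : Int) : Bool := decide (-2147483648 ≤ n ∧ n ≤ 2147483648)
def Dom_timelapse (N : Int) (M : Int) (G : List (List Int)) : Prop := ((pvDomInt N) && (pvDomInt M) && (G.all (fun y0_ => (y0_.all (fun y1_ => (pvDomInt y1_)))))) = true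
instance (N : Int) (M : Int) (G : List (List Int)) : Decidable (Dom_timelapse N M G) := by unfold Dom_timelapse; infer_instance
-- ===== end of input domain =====

-- One iceberg melting step. B inverts A's data flow: instead of gathering the 4-neighbour
-- water count per land cell while writing the output grid, B first scatters +1 from every
-- water cell onto its in-bounds neighbours into a melt-count grid, then builds the output
-- in a second pure pass (objective: alternative decomposition, same cost).

-- ===== PORT A =====
-- Python:  G_after[r][c] = v  (r, c in range, so List.set on nested lists is exact)
def pvSetCell (grid : List (List Int)) (r c : Nat) (v : Int) : List (List Int) :=
  grid.set r ((grid.getD r []).set c v)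

def timelapse (N : Int) (M : Int) (G : List (List Int)) : List (List Int) :=
  let dr : List Int := [1, -1, 0, 0]
  let dc : List Int := [0, 0, 1, -1]
  let G_after := (PySem.List.pyRange 0 N 1).map (fun _ => List.replicate M.toNat (0 : Int))
  (PySem.List.pyRange 0 N 1).foldl (fun ga r =>
    (PySem.List.pyRange 0 M 1).foldl (fun ga c =>
      if PySem.List.pyGetD (PySem.List.pyGetD G r []) c 0 > 0 then
        let lower : Int := (PySem.List.pyRange 0 4 1).foldl (fun lower i =>
          let nr := r + PySem.List.pyGetD dr i 0
          let nc := c + PySem.List.pyGetD dc i 0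
          if 0 ≤ nr ∧ nr < N ∧ 0 ≤ nc ∧ nc < M then
            if PySem.List.pyGetD (PySem.List.pyGetD G nr []) nc 0 = 0 then lower + 1 else lower
          else lower) 0
        pvSetCell ga r.toNat c.toNat (max (PySem.List.pyGetD (PySem.List.pyGetD G r []) c 0 - lower) 0)
      else ga) ga) G_after

-- ===== PORT B =====
-- Python:  melt[r][c] += 1  (indices in range, so List.set on nested lists is exact)
def pvIncCell (g : List (List Int)) (r c : Nat) : List (List Int) :=
  g.set r ((g.getD r []).set c ((g.getD r []).getD c 0 + 1))

def timelapse_alt (N : Int) (M : Int) (G : List (List Int)) : List (List Int) :=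
  let melt0 := (PySem.List.pyRange 0 N 1).map (fun _ => List.replicate M.toNat (0 : Int))
  let melt := (PySem.List.pyRange 0 N 1).foldl (fun melt r =>
    (PySem.List.pyRange 0 M 1).foldl (fun melt c =>
      if PySem.List.pyGetD (PySem.List.pyGetD G r []) c 0 = 0 then
        ([(r + 1, c), (r - 1, c), (r, c + 1), (r, c - 1)] : List (Int × Int)).foldl
          (fun melt p =>
            if 0 ≤ p.1 ∧ p.1 < N ∧ 0 ≤ p.2 ∧ p.2 < M then pvIncCell melt p.1.toNat p.2.toNat
            else melt) melt
      else melt) melt) melt0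
  (PySem.List.pyRange 0 N 1).map (fun r =>
    (PySem.List.pyRange 0 M 1).map (fun c =>
      if PySem.List.pyGetD (PySem.List.pyGetD G r []) c 0 > 0 then
        max (PySem.List.pyGetD (PySem.List.pyGetD G r []) c 0
          - PySem.List.pyGetD (PySem.List.pyGetD melt r []) c 0) 0
      else 0))

-- ===== PRECONDITION & SPEC =====
-- Pre_ excludes exactly the inputs where the Python A raises IndexError: N > 0 and M > 0
-- together with N > len(G) or one of the first N rows shorter than M (B raises there too).
def Pre_timelapse (N : Int) (M : Int) (G : List (List Int)) : Prop :=
  N ≤ 0 ∨ M ≤ 0 ∨ (N ≤ (G.length : Int) ∧ ∀ r ∈ List.range N.toNat, M ≤ ((G.getD r []).length : Int))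

instance (N : Int) (M : Int) (G : List (List Int)) : Decidable (Pre_timelapse N M G) := by
  unfold Pre_timelapse; infer_instance

def pvWitness_timelapse : Int × Int × List (List Int) := (2, 2, [[1, 2], [0, 3]])

def Spec_timelapse (N : Int) (M : Int) (G : List (List Int)) (out : List (List Int)) : Prop :=
  out = timelapse_alt N M G
instance (N : Int) (M : Int) (G : List (List Int)) (out : List (List Int)) : Decidable (Spec_timelapse N M G out) := by unfold Spec_timelapse; infer_instance

-- ===== CLAIM (what is proved, stated in full; the proofs are below) =====
def Claim_equal_timelapse : Prop := ∀ (N : Int) (M : Int) (G : List (List Int)), Dom_timelapse N M G → Pre_timelapse N M G → Spec_timelapse N M G (timelapse N M G)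

-- ===== LEMMAS AND PROOFS =====

-- The common pointwise description of one melting step.
def pvG (G : List (List Int)) (r c : Nat) : Int := (G.getD r []).getD c 0

def pvWat (N M : Int) (G : List (List Int)) (ri ci : Int) : Int :=
  if 0 ≤ ri ∧ ri < N ∧ 0 ≤ ci ∧ ci < M then
    (if (G.getD ri.toNat []).getD ci.toNat 0 = 0 then 1 else 0)
  else 0

def pvLow (N M : Int) (G : List (List Int)) (r c : Nat) : Int :=
  pvWat N M G ((r : Int) + 1) c + pvWat N M G ((r : Int) - 1) c
    + pvWat N M G r ((c : Int) + 1) + pvWat N M G r ((c : Int) - 1)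

def pvF (N M : Int) (G : List (List Int)) (r c : Nat) : Int :=
  if 0 < pvG G r c then max (pvG G r c - pvLow N M G r c) 0 else 0

def pvRowOut (N M : Int) (G : List (List Int)) (r : Nat) : List Int :=
  (List.range M.toNat).map (pvF N M G r)

def pvSpec (N M : Int) (G : List (List Int)) : List (List Int) :=
  (List.range N.toNat).map (pvRowOut N M G)

lemma pv_pyRange_toNat (a : Int) :
    PySem.List.pyRange 0 a 1 = PySem.List.pyRange 0 ((a.toNat : Int)) 1 := by
  rcases (by omega : a ≤ 0 ∨ 0 < a) with h | h
  · rw [PySem.List.pyRange_one_eq_nil h, PySem.List.pyRange_one_eq_nil (by omega)]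
  · rw [Int.toNat_of_nonneg h.le]

lemma pv_watAux (N M : Int) (G : List (List Int)) (ri ci x : Int) :
    (if 0 ≤ ri ∧ ri < N ∧ 0 ≤ ci ∧ ci < M then
        (if PySem.List.pyGetD (PySem.List.pyGetD G ri []) ci 0 = 0 then x + 1 else x)
      else x) = x + pvWat N M G ri ci := by
  by_cases h : 0 ≤ ri ∧ ri < N ∧ 0 ≤ ci ∧ ci < M
  · rw [if_pos h, PySem.List.pyGetD_of_nonneg _ _ h.1,
      PySem.List.pyGetD_of_nonneg _ _ h.2.2.1, pvWat, if_pos h]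
    split_ifs <;> omega
  · rw [if_neg h, pvWat, if_neg h]; omega

-- A's inner direction loop computes the 4-neighbour water count.
lemma pv_lowerA (N M : Int) (G : List (List Int)) (r c : Int) :
    ((PySem.List.pyRange 0 4 1).foldl (fun lower i =>
        let nr := r + PySem.List.pyGetD [(1 : Int), -1, 0, 0] i 0
        let nc := c + PySem.List.pyGetD [(0 : Int), 0, 1, -1] i 0
        if 0 ≤ nr ∧ nr < N ∧ 0 ≤ nc ∧ nc < M then
          if PySem.List.pyGetD (PySem.List.pyGetD G nr []) nc 0 = 0 then lower + 1 else lower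
        else lower) 0)
      = pvWat N M G (r + 1) c + pvWat N M G (r - 1) c
        + pvWat N M G r (c + 1) + pvWat N M G r (c - 1) := by
  have h4 : PySem.List.pyRange 0 4 1 = [0, 1, 2, 3] := by decide
  have e1 : PySem.List.pyGetD [(1 : Int), -1, 0, 0] 0 0 = 1 := by decide
  have e2 : PySem.List.pyGetD [(1 : Int), -1, 0, 0] 1 0 = -1 := by decide
  have e3 : PySem.List.pyGetD [(1 : Int), -1, 0, 0] 2 0 = 0 := by decide
  have e4 : PySem.List.pyGetD [(1 : Int), -1, 0, 0] 3 0 = 0 := by decide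
  have f1 : PySem.List.pyGetD [(0 : Int), 0, 1, -1] 0 0 = 0 := by decide
  have f2 : PySem.List.pyGetD [(0 : Int), 0, 1, -1] 1 0 = 0 := by decide
  have f3 : PySem.List.pyGetD [(0 : Int), 0, 1, -1] 2 0 = 1 := by decide
  have f4 : PySem.List.pyGetD [(0 : Int), 0, 1, -1] 3 0 = -1 := by decide
  rw [h4]
  simp only [List.foldl_cons, List.foldl_nil, e1, e2, e3, e4, f1, f2, f3, f4]
  rw [pv_watAux, pv_watAux, pv_watAux, pv_watAux]
  simp only [add_zero, ← sub_eq_add_neg]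
  omega

-- A's loop bodies, named so the fold lemmas can speak about them (definitional copies).
def pvRowBody (N M : Int) (G : List (List Int)) (r : Int) : List Int → Int → List Int :=
  fun row c =>
    if PySem.List.pyGetD (PySem.List.pyGetD G r []) c 0 > 0 then
      row.set c.toNat (max (PySem.List.pyGetD (PySem.List.pyGetD G r []) c 0 -
        ((PySem.List.pyRange 0 4 1).foldl (fun lower i =>
          let nr := r + PySem.List.pyGetD [(1 : Int), -1, 0, 0] i 0
          let nc := c + PySem.List.pyGetD [(0 : Int), 0, 1, -1] i 0
          if 0 ≤ nr ∧ nr < N ∧ 0 ≤ nc ∧ nc < M then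
            if PySem.List.pyGetD (PySem.List.pyGetD G nr []) nc 0 = 0 then lower + 1 else lower
          else lower) 0)) 0)
    else row

def pvCellBody (N M : Int) (G : List (List Int)) (r : Int) :
    List (List Int) → Int → List (List Int) :=
  fun ga c =>
    if PySem.List.pyGetD (PySem.List.pyGetD G r []) c 0 > 0 then
      pvSetCell ga r.toNat c.toNat (max (PySem.List.pyGetD (PySem.List.pyGetD G r []) c 0 -
        ((PySem.List.pyRange 0 4 1).foldl (fun lower i =>
          let nr := r + PySem.List.pyGetD [(1 : Int), -1, 0, 0] i 0
          let nc := c + PySem.List.pyGetD [(0 : Int), 0, 1, -1] i 0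
          if 0 ≤ nr ∧ nr < N ∧ 0 ≤ nc ∧ nc < M then
            if PySem.List.pyGetD (PySem.List.pyGetD G nr []) nc 0 = 0 then lower + 1 else lower
          else lower) 0)) 0)
    else ga

def pvOuterBody (N M : Int) (G : List (List Int)) :
    List (List Int) → Int → List (List Int) :=
  fun ga r => (PySem.List.pyRange 0 M 1).foldl (pvCellBody N M G r) ga

lemma pv_timelapse_eq (N M : Int) (G : List (List Int)) :
    timelapse N M G = (PySem.List.pyRange 0 N 1).foldl (pvOuterBody N M G)
      ((PySem.List.pyRange 0 N 1).map (fun _ => List.replicate M.toNat 0)) := rfl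

lemma pv_cellBody_set (N M : Int) (G : List (List Int)) (r : Int)
    (ga : List (List Int)) (c : Int) (hk : r.toNat < ga.length) :
    pvCellBody N M G r ga c = ga.set r.toNat (pvRowBody N M G r (ga.getD r.toNat []) c) := by
  unfold pvCellBody pvRowBody pvSetCell
  by_cases h : PySem.List.pyGetD (PySem.List.pyGetD G r []) c 0 > 0
  · rw [if_pos h, if_pos h]
  · rw [if_neg h, if_neg h, List.getD_eq_getElem?_getD, List.getElem?_eq_getElem hk]
    simp [List.set_getElem_self hk]

lemma pv_fold_set (N M : Int) (G : List (List Int)) (r : Int) :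
    ∀ (cs : List Int) (ga : List (List Int)), r.toNat < ga.length →
      cs.foldl (pvCellBody N M G r) ga
        = ga.set r.toNat (cs.foldl (pvRowBody N M G r) (ga.getD r.toNat [])) := by
  intro cs
  induction cs with
  | nil =>
    intro ga hk
    rw [List.foldl_nil, List.foldl_nil, List.getD_eq_getElem?_getD,
      List.getElem?_eq_getElem hk]
    simp [List.set_getElem_self hk]
  | cons c cs ih =>
    intro ga hk
    rw [List.foldl_cons, List.foldl_cons, pv_cellBody_set N M G r ga c hk]
    have hk2 : r.toNat < (ga.set r.toNat (pvRowBody N M G r (ga.getD r.toNat []) c)).length := by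
      simpa using hk
    rw [ih _ hk2, List.set_set]
    congr 1
    rw [List.getD_eq_getElem?_getD (l := ga.set r.toNat _), List.getElem?_eq_getElem hk2,
      List.getElem_set_self hk2]
    rfl

lemma pv_rowfold (N M : Int) (G : List (List Int)) (r : Nat) :
    ∀ k : Nat, k ≤ M.toNat →
      (PySem.List.pyRange 0 (k : Int) 1).foldl (pvRowBody N M G r) (List.replicate M.toNat 0)
        = (List.range k).map (pvF N M G r) ++ List.replicate (M.toNat - k) 0 := by
  intro k
  induction k with
  | zero =>
    intro _
    rw [PySem.List.pyRange_one_eq_nil (by omega)]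
    simp
  | succ k ih =>
    intro hk
    have hc : ((k + 1 : Nat) : Int) = (k : Int) + 1 := by push_cast; ring
    rw [hc, PySem.List.pyRange_one_succ_right (by positivity), List.foldl_append,
      ih (by omega)]
    unfold pvRowBody
    rw [List.foldl_cons, List.foldl_nil]
    rw [pv_lowerA]
    simp only [PySem.List.pyGetD_natCast, Int.toNat_natCast]
    have hlenpref : ((List.range k).map (pvF N M G r)).length = k := by simp
    have hm : M.toNat - k = (M.toNat - (k + 1)) + 1 := by omega
    by_cases h : (G.getD r []).getD k 0 > 0
    · rw [if_pos h, hm, List.replicate_succ, List.set_append, if_neg (by omega), hlenpref,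
        Nat.sub_self, List.set_cons_zero, List.range_succ, List.map_append]
      simp only [List.map_cons, List.map_nil, List.append_assoc, List.singleton_append]
      congr 2
      unfold pvF pvG pvLow
      rw [if_pos h]
    · rw [if_neg h, hm, List.replicate_succ, List.range_succ, List.map_append]
      simp only [List.map_cons, List.map_nil, List.append_assoc, List.singleton_append]
      congr 2
      unfold pvF pvG
      rw [if_neg h]

lemma pv_outerfold (N M : Int) (G : List (List Int)) :
    ∀ k : Nat, k ≤ N.toNat →
      (PySem.List.pyRange 0 (k : Int) 1).foldl (pvOuterBody N M G)
          (List.replicate N.toNat (List.replicate M.toNat 0))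
        = (List.range k).map (pvRowOut N M G)
            ++ List.replicate (N.toNat - k) (List.replicate M.toNat 0) := by
  intro k
  induction k with
  | zero =>
    intro _
    rw [PySem.List.pyRange_one_eq_nil (by omega)]
    simp
  | succ k ih =>
    intro hk
    have hc : ((k + 1 : Nat) : Int) = (k : Int) + 1 := by push_cast; ring
    rw [hc, PySem.List.pyRange_one_succ_right (by positivity), List.foldl_append,
      ih (by omega), List.foldl_cons, List.foldl_nil]
    unfold pvOuterBody
    have hlenpref : ((List.range k).map (pvRowOut N M G)).length = k := by simp
    have hklen : ((k : Int)).toNat <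
        ((List.range k).map (pvRowOut N M G)
          ++ List.replicate (N.toNat - k) (List.replicate M.toNat 0)).length := by
      simp only [List.length_append, List.length_map, List.length_range, List.length_replicate,
        Int.toNat_natCast]
      omega
    rw [pv_fold_set N M G (k : Int) _ _ hklen]
    simp only [Int.toNat_natCast]
    have hget : ((List.range k).map (pvRowOut N M G)
        ++ List.replicate (N.toNat - k) (List.replicate M.toNat 0)).getD k []
        = List.replicate M.toNat 0 := by
      rw [List.getD_eq_getElem?_getD, List.getElem?_append_right (by omega), hlenpref,
        Nat.sub_self, List.getElem?_replicate, if_pos (by omega)]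
      rfl
    rw [hget, pv_pyRange_toNat M, pv_rowfold N M G k M.toNat (le_refl _), Nat.sub_self,
      List.replicate_zero, List.append_nil]
    have hm : N.toNat - k = (N.toNat - (k + 1)) + 1 := by omega
    rw [hm, List.replicate_succ, List.set_append, if_neg (by omega), hlenpref, Nat.sub_self,
      List.set_cons_zero, List.range_succ, List.map_append]
    simp [pvRowOut, List.append_assoc]

-- A = pointwise spec (unconditionally: A reads out-of-range cells only through defaults
-- that pvG shares)
lemma pvA (N M : Int) (G : List (List Int)) : timelapse N M G = pvSpec N M G := by
  rw [pv_timelapse_eq, pv_pyRange_toNat N]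
  have hinit : ((PySem.List.pyRange 0 ((N.toNat : Int)) 1).map
      (fun _ => List.replicate M.toNat (0 : Int)))
      = List.replicate N.toNat (List.replicate M.toNat 0) := by
    rw [PySem.List.pyRange_zero_natCast, List.map_map,
      show ((fun _ => List.replicate M.toNat (0 : Int)) ∘ fun (k : Nat) => (k : Int))
          = (fun _ => List.replicate M.toNat (0 : Int)) from rfl,
      List.map_const']
    simp
  rw [hinit, pv_outerfold N M G N.toNat (le_refl _), Nat.sub_self, List.replicate_zero,
    List.append_nil]
  rfl


-- B-side: grid shape through the scatter phase, and its pointwise effect.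
def pvShape (g : List (List Int)) (n m : Nat) : Prop :=
  g.length = n ∧ ∀ row ∈ g, row.length = m

-- B's loop bodies, named so the fold lemmas can speak about them (definitional copies).
def pvNbrStep (N M : Int) : List (List Int) → Int × Int → List (List Int) :=
  fun melt p =>
    if 0 ≤ p.1 ∧ p.1 < N ∧ 0 ≤ p.2 ∧ p.2 < M then pvIncCell melt p.1.toNat p.2.toNat else melt

def pvScatCell (N M : Int) (G : List (List Int)) (r : Int) :
    List (List Int) → Int → List (List Int) :=
  fun melt c =>
    if PySem.List.pyGetD (PySem.List.pyGetD G r []) c 0 = 0 then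
      ([(r + 1, c), (r - 1, c), (r, c + 1), (r, c - 1)] : List (Int × Int)).foldl
        (pvNbrStep N M) melt
    else melt

def pvScatRow (N M : Int) (G : List (List Int)) : List (List Int) → Int → List (List Int) :=
  fun melt r => (PySem.List.pyRange 0 M 1).foldl (pvScatCell N M G r) melt

def pvMelt (N M : Int) (G : List (List Int)) : List (List Int) :=
  (PySem.List.pyRange 0 N 1).foldl (pvScatRow N M G)
    ((PySem.List.pyRange 0 N 1).map (fun _ => List.replicate M.toNat 0))

lemma pv_alt_eq (N M : Int) (G : List (List Int)) :
    timelapse_alt N M G = (PySem.List.pyRange 0 N 1).map (fun r =>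
      (PySem.List.pyRange 0 M 1).map (fun c =>
        if PySem.List.pyGetD (PySem.List.pyGetD G r []) c 0 > 0 then
          max (PySem.List.pyGetD (PySem.List.pyGetD G r []) c 0
            - PySem.List.pyGetD (PySem.List.pyGetD (pvMelt N M G) r []) c 0) 0
        else 0)) := rfl

lemma pv_if_iff {P Q : Prop} [Decidable P] [Decidable Q] (h : P ↔ Q) :
    (if P then (1 : Int) else 0) = if Q then 1 else 0 := by
  by_cases hP : P
  · rw [if_pos hP, if_pos (h.mp hP)]
  · rw [if_neg hP, if_neg fun hQ => hP (h.mpr hQ)]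

lemma pv_getD_mem (g : List (List Int)) (a : Nat) (ha : a < g.length) : g.getD a [] ∈ g := by
  have h : g.getD a [] = g[a] := by
    rw [List.getD_eq_getElem?_getD, List.getElem?_eq_getElem ha]; rfl
  rw [h]; exact List.getElem_mem ha

lemma pv_getD_set_ne {α : Type} (l : List α) (i j : Nat) (v : α) (d : α) (h : i ≠ j) :
    (l.set i v).getD j d = l.getD j d := by
  rw [List.getD_eq_getElem?_getD, List.getElem?_set_ne h, List.getD_eq_getElem?_getD]

lemma pv_getD_set_self {α : Type} (l : List α) (i : Nat) (v : α) (d : α)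
    (h : i < l.length) : (l.set i v).getD i d = v := by
  rw [List.getD_eq_getElem?_getD, List.getElem?_set_self h]; rfl

lemma pv_inc_shape {g : List (List Int)} {n m : Nat} (hs : pvShape g n m) {a b : Nat}
    (ha : a < n) : pvShape (pvIncCell g a b) n m := by
  obtain ⟨h1, h2⟩ := hs
  refine ⟨by simp [pvIncCell, h1], ?_⟩
  intro row hrow
  rcases List.mem_or_eq_of_mem_set hrow with h | h
  · exact h2 _ h
  · subst h
    rw [List.length_set]
    exact h2 _ (pv_getD_mem g a (by omega))

lemma pv_inc_val {g : List (List Int)} {n m : Nat} (hs : pvShape g n m) {a b : Nat}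
    (ha : a < n) (hb : b < m) (p q : Nat) :
    pvG (pvIncCell g a b) p q = pvG g p q + (if a = p ∧ b = q then 1 else 0) := by
  obtain ⟨h1, h2⟩ := hs
  have harow : (g.getD a []).length = m := h2 _ (pv_getD_mem g a (by omega))
  unfold pvG pvIncCell
  by_cases hap : a = p
  · subst hap
    rw [pv_getD_set_self _ _ _ _ (by omega)]
    by_cases hbq : b = q
    · subst hbq
      rw [if_pos ⟨rfl, rfl⟩, pv_getD_set_self _ _ _ _ (by omega)]
    · rw [if_neg (fun h => hbq h.2), pv_getD_set_ne _ _ _ _ _ hbq, add_zero]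
  · rw [if_neg (fun h => hap h.1), pv_getD_set_ne _ _ _ _ _ hap, add_zero]

lemma pv_step_val (N M : Int) {n m : Nat} (hn : n = N.toNat) (hm : m = M.toNat)
    {g : List (List Int)} (hs : pvShape g n m) (a b : Int) {p q : Nat}
    (hp : p < n) (hq : q < m) :
    pvShape (pvNbrStep N M g (a, b)) n m ∧
      pvG (pvNbrStep N M g (a, b)) p q
        = pvG g p q + (if a = (p : Int) ∧ b = (q : Int) then 1 else 0) := by
  unfold pvNbrStep
  by_cases hc : 0 ≤ a ∧ a < N ∧ 0 ≤ b ∧ b < M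
  · rw [if_pos hc]
    have ha : a.toNat < n := by omega
    have hb : b.toNat < m := by omega
    refine ⟨pv_inc_shape hs ha, ?_⟩
    rw [pv_inc_val hs ha hb]
    congr 1
    exact pv_if_iff ⟨fun h => ⟨by omega, by omega⟩, fun h => ⟨by omega, by omega⟩⟩
  · rw [if_neg hc]
    refine ⟨hs, ?_⟩
    rw [if_neg (fun h => hc ⟨by omega, by omega, by omega, by omega⟩), add_zero]

-- The contribution that scattering from cell (r, c) deposits at (p, q).
def pvCellAdd (N M : Int) (G : List (List Int)) (r c : Int) (p q : Nat) : Int :=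
  if PySem.List.pyGetD (PySem.List.pyGetD G r []) c 0 = 0 then
    ((if r + 1 = (p : Int) ∧ c = (q : Int) then 1 else 0)
      + (if r - 1 = (p : Int) ∧ c = (q : Int) then 1 else 0)
      + (if r = (p : Int) ∧ c + 1 = (q : Int) then 1 else 0)
      + (if r = (p : Int) ∧ c - 1 = (q : Int) then 1 else 0))
  else 0

lemma pv_cell_val (N M : Int) (G : List (List Int)) (r : Int) {n m : Nat}
    (hn : n = N.toNat) (hm : m = M.toNat) {g : List (List Int)} (hs : pvShape g n m)
    (c : Int) {p q : Nat} (hp : p < n) (hq : q < m) :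
    pvShape (pvScatCell N M G r g c) n m ∧
      pvG (pvScatCell N M G r g c) p q = pvG g p q + pvCellAdd N M G r c p q := by
  unfold pvScatCell pvCellAdd
  by_cases hw : PySem.List.pyGetD (PySem.List.pyGetD G r []) c 0 = 0
  · rw [if_pos hw, if_pos hw]
    simp only [List.foldl_cons, List.foldl_nil]
    obtain ⟨s1, v1⟩ := pv_step_val N M hn hm hs (r + 1) c hp hq
    obtain ⟨s2, v2⟩ := pv_step_val N M hn hm s1 (r - 1) c hp hq
    obtain ⟨s3, v3⟩ := pv_step_val N M hn hm s2 r (c + 1) hp hq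
    obtain ⟨s4, v4⟩ := pv_step_val N M hn hm s3 r (c - 1) hp hq
    refine ⟨s4, ?_⟩
    rw [v4, v3, v2, v1]
    ring
  · rw [if_neg hw, if_neg hw, add_zero]
    exact ⟨hs, rfl⟩

lemma pv_inner_scat (N M : Int) (G : List (List Int)) (r : Int) {n m : Nat}
    (hn : n = N.toNat) (hm : m = M.toNat) {p q : Nat} (hp : p < n) (hq : q < m) :
    ∀ (l : List Int) (g : List (List Int)), pvShape g n m →
      pvShape (l.foldl (pvScatCell N M G r) g) n m ∧
        pvG (l.foldl (pvScatCell N M G r) g) p q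
          = pvG g p q + (l.map (fun c => pvCellAdd N M G r c p q)).sum := by
  intro l
  induction l with
  | nil => intro g hs; exact ⟨hs, by simp⟩
  | cons c cs ih =>
    intro g hs
    obtain ⟨s1, v1⟩ := pv_cell_val N M G r hn hm hs c hp hq
    obtain ⟨s2, v2⟩ := ih _ s1
    refine ⟨s2, ?_⟩
    rw [List.foldl_cons, List.map_cons, List.sum_cons, v2, v1]
    ring

lemma pv_outer_scat (N M : Int) (G : List (List Int)) {n m : Nat}
    (hn : n = N.toNat) (hm : m = M.toNat) {p q : Nat} (hp : p < n) (hq : q < m) :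
    ∀ (l : List Int) (g : List (List Int)), pvShape g n m →
      pvShape (l.foldl (pvScatRow N M G) g) n m ∧
        pvG (l.foldl (pvScatRow N M G) g) p q
          = pvG g p q + (l.map (fun r =>
              ((PySem.List.pyRange 0 M 1).map (fun c => pvCellAdd N M G r c p q)).sum)).sum := by
  intro l
  induction l with
  | nil => intro g hs; exact ⟨hs, by simp⟩
  | cons r0 rs ih =>
    intro g hs
    obtain ⟨s1, v1⟩ := pv_inner_scat N M G r0 hn hm hp hq (PySem.List.pyRange 0 M 1) g hs
    obtain ⟨s2, v2⟩ := ih _ s1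
    refine ⟨s2, ?_⟩
    rw [List.foldl_cons, List.map_cons, List.sum_cons,
      show pvScatRow N M G g r0 = (PySem.List.pyRange 0 M 1).foldl (pvScatCell N M G r0) g
        from rfl, v2, v1]
    ring

lemma pv_list_sum_range (n : Nat) (f : Nat → Int) :
    ((List.range n).map f).sum = ∑ i ∈ Finset.range n, f i := rfl

lemma pv_sum_point (n : Nat) (a : Int) (f : Nat → Int)
    (h0 : ∀ c : Nat, (c : Int) ≠ a → f c = 0) :
    (∑ c ∈ Finset.range n, f c) = if 0 ≤ a ∧ a < (n : Int) then f a.toNat else 0 := by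
  induction n with
  | zero => rw [Finset.range_zero, Finset.sum_empty, if_neg (by omega)]
  | succ k ih =>
    rw [Finset.sum_range_succ, ih]
    by_cases hk : (k : Int) = a
    · rw [if_neg (by omega), if_pos (by omega), zero_add]
      congr 1
      omega
    · rw [h0 k hk, add_zero]
      by_cases hc : 0 ≤ a ∧ a < (k : Int)
      · rw [if_pos hc, if_pos (by omega)]
      · rw [if_neg hc, if_neg (by omega)]

-- The four indicator families (by in-window neighbour direction) and their column sums.
def pvT1 (G : List (List Int)) (p q r c : Nat) : Int :=
  if ((r : Int) + 1 = (p : Int) ∧ (c : Int) = (q : Int)) ∧ pvG G r c = 0 then 1 else 0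
def pvT2 (G : List (List Int)) (p q r c : Nat) : Int :=
  if ((r : Int) - 1 = (p : Int) ∧ (c : Int) = (q : Int)) ∧ pvG G r c = 0 then 1 else 0
def pvT3 (G : List (List Int)) (p q r c : Nat) : Int :=
  if ((r : Int) = (p : Int) ∧ (c : Int) + 1 = (q : Int)) ∧ pvG G r c = 0 then 1 else 0
def pvT4 (G : List (List Int)) (p q r c : Nat) : Int :=
  if ((r : Int) = (p : Int) ∧ (c : Int) - 1 = (q : Int)) ∧ pvG G r c = 0 then 1 else 0

def pvU1 (G : List (List Int)) (p q r : Nat) : Int :=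
  if (r : Int) + 1 = (p : Int) ∧ pvG G r q = 0 then 1 else 0
def pvU2 (G : List (List Int)) (p q r : Nat) : Int :=
  if (r : Int) - 1 = (p : Int) ∧ pvG G r q = 0 then 1 else 0
def pvU3 (G : List (List Int)) (p q r : Nat) : Int :=
  if ((r : Int) = (p : Int) ∧ 1 ≤ q) ∧ pvG G r (q - 1) = 0 then 1 else 0
def pvU4 (G : List (List Int)) (m p q r : Nat) : Int :=
  if ((r : Int) = (p : Int) ∧ q + 1 < m) ∧ pvG G r (q + 1) = 0 then 1 else 0

lemma pv_cellAdd_nat (N M : Int) (G : List (List Int)) (r c p q : Nat) :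
    pvCellAdd N M G (r : Int) (c : Int) p q
      = pvT1 G p q r c + pvT2 G p q r c + pvT3 G p q r c + pvT4 G p q r c := by
  unfold pvCellAdd pvT1 pvT2 pvT3 pvT4 pvG
  simp only [PySem.List.pyGetD_natCast]
  split_ifs <;> omega

lemma pv_sum_t1 (M : Int) (G : List (List Int)) (p q : Nat) (hq : q < M.toNat) (r : Nat) :
    ∑ c ∈ Finset.range M.toNat, pvT1 G p q r c = pvU1 G p q r := by
  unfold pvT1 pvU1
  rw [pv_sum_point M.toNat (q : Int) _ (fun c hc => if_neg (fun h => hc h.1.2)),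
    if_pos ⟨by omega, by omega⟩, Int.toNat_natCast]
  exact pv_if_iff ⟨fun h => ⟨h.1.1, h.2⟩, fun h => ⟨⟨h.1, rfl⟩, h.2⟩⟩

lemma pv_sum_t2 (M : Int) (G : List (List Int)) (p q : Nat) (hq : q < M.toNat) (r : Nat) :
    ∑ c ∈ Finset.range M.toNat, pvT2 G p q r c = pvU2 G p q r := by
  unfold pvT2 pvU2
  rw [pv_sum_point M.toNat (q : Int) _ (fun c hc => if_neg (fun h => hc h.1.2)),
    if_pos ⟨by omega, by omega⟩, Int.toNat_natCast]
  exact pv_if_iff ⟨fun h => ⟨h.1.1, h.2⟩, fun h => ⟨⟨h.1, rfl⟩, h.2⟩⟩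

lemma pv_sum_t3 (M : Int) (G : List (List Int)) (p q : Nat) (hq : q < M.toNat) (r : Nat) :
    ∑ c ∈ Finset.range M.toNat, pvT3 G p q r c = pvU3 G p q r := by
  unfold pvT3 pvU3
  rw [pv_sum_point M.toNat ((q : Int) - 1) _ (fun c hc => if_neg (fun h => hc (by omega)))]
  by_cases h1 : 1 ≤ q
  · rw [if_pos ⟨by omega, by omega⟩, show ((q : Int) - 1).toNat = q - 1 from by omega]
    exact pv_if_iff ⟨fun h => ⟨⟨h.1.1, h1⟩, h.2⟩, fun h => ⟨⟨h.1.1, by omega⟩, h.2⟩⟩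
  · rw [if_neg (by omega), if_neg (by omega)]

lemma pv_sum_t4 (M : Int) (G : List (List Int)) (p q : Nat) (hq : q < M.toNat) (r : Nat) :
    ∑ c ∈ Finset.range M.toNat, pvT4 G p q r c = pvU4 G M.toNat p q r := by
  unfold pvT4 pvU4
  rw [pv_sum_point M.toNat ((q : Int) + 1) _ (fun c hc => if_neg (fun h => hc (by omega)))]
  by_cases h1 : q + 1 < M.toNat
  · rw [if_pos ⟨by omega, by omega⟩, show ((q : Int) + 1).toNat = q + 1 from by omega]
    exact pv_if_iff ⟨fun h => ⟨⟨h.1.1, h1⟩, h.2⟩, fun h => ⟨⟨h.1.1, by omega⟩, h.2⟩⟩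
  · rw [if_neg (by omega), if_neg (by omega)]

lemma pv_sum_u1 (N M : Int) (G : List (List Int)) (p q : Nat)
    (hp : p < N.toNat) (hq : q < M.toNat) :
    ∑ r ∈ Finset.range N.toNat, pvU1 G p q r = pvWat N M G ((p : Int) - 1) (q : Int) := by
  unfold pvU1 pvWat pvG
  rw [pv_sum_point N.toNat ((p : Int) - 1) _ (fun r hr => if_neg (fun h => hr (by omega))),
    Int.toNat_natCast]
  by_cases h1 : 1 ≤ p
  · rw [show ((p : Int) - 1).toNat = p - 1 from by omega]
    split_ifs <;> omega
  · split_ifs <;> omega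

lemma pv_sum_u2 (N M : Int) (G : List (List Int)) (p q : Nat)
    (hp : p < N.toNat) (hq : q < M.toNat) :
    ∑ r ∈ Finset.range N.toNat, pvU2 G p q r = pvWat N M G ((p : Int) + 1) (q : Int) := by
  unfold pvU2 pvWat pvG
  rw [pv_sum_point N.toNat ((p : Int) + 1) _ (fun r hr => if_neg (fun h => hr (by omega))),
    Int.toNat_natCast, show ((p : Int) + 1).toNat = p + 1 from by omega]
  split_ifs <;> omega

lemma pv_sum_u3 (N M : Int) (G : List (List Int)) (p q : Nat)
    (hp : p < N.toNat) (hq : q < M.toNat) :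
    ∑ r ∈ Finset.range N.toNat, pvU3 G p q r = pvWat N M G (p : Int) ((q : Int) - 1) := by
  unfold pvU3 pvWat pvG
  rw [pv_sum_point N.toNat (p : Int) _ (fun r hr => if_neg (fun h => hr h.1.1)),
    Int.toNat_natCast]
  by_cases h1 : 1 ≤ q
  · rw [show ((q : Int) - 1).toNat = q - 1 from by omega]
    split_ifs <;> omega
  · split_ifs <;> omega

lemma pv_sum_u4 (N M : Int) (G : List (List Int)) (p q : Nat)
    (hp : p < N.toNat) (hq : q < M.toNat) :
    ∑ r ∈ Finset.range N.toNat, pvU4 G M.toNat p q r = pvWat N M G (p : Int) ((q : Int) + 1) := by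
  unfold pvU4 pvWat pvG
  rw [pv_sum_point N.toNat (p : Int) _ (fun r hr => if_neg (fun h => hr h.1.1)),
    Int.toNat_natCast, show ((q : Int) + 1).toNat = q + 1 from by omega]
  split_ifs <;> omega

-- Total scattered contribution at an in-window cell = A's gathered 4-neighbour water count.
lemma pv_sum_eq_low (N M : Int) (G : List (List Int)) {p q : Nat}
    (hp : p < N.toNat) (hq : q < M.toNat) :
    ((List.range N.toNat).map (fun (r : Nat) =>
        ((List.range M.toNat).map (fun (c : Nat) => pvCellAdd N M G (r : Int) (c : Int) p q)).sum)).sum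
      = pvLow N M G p q := by
  have hrow : ∀ r : Nat,
      ((List.range M.toNat).map (fun (c : Nat) => pvCellAdd N M G (r : Int) (c : Int) p q)).sum
        = pvU1 G p q r + pvU2 G p q r + pvU3 G p q r + pvU4 G M.toNat p q r := by
    intro r
    rw [pv_list_sum_range]
    rw [show (∑ c ∈ Finset.range M.toNat, pvCellAdd N M G (r : Int) (c : Int) p q)
        = ∑ c ∈ Finset.range M.toNat,
            (pvT1 G p q r c + pvT2 G p q r c + pvT3 G p q r c + pvT4 G p q r c)
      from Finset.sum_congr rfl (fun c _ => pv_cellAdd_nat N M G r c p q)]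
    simp only [Finset.sum_add_distrib]
    rw [pv_sum_t1 M G p q hq r, pv_sum_t2 M G p q hq r, pv_sum_t3 M G p q hq r,
      pv_sum_t4 M G p q hq r]
  rw [pv_list_sum_range]
  rw [show (∑ r ∈ Finset.range N.toNat,
        ((List.range M.toNat).map (fun (c : Nat) => pvCellAdd N M G (r : Int) (c : Int) p q)).sum)
      = ∑ r ∈ Finset.range N.toNat,
          (pvU1 G p q r + pvU2 G p q r + pvU3 G p q r + pvU4 G M.toNat p q r)
    from Finset.sum_congr rfl (fun r _ => hrow r)]
  simp only [Finset.sum_add_distrib]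
  rw [pv_sum_u1 N M G p q hp hq, pv_sum_u2 N M G p q hp hq, pv_sum_u3 N M G p q hp hq,
    pv_sum_u4 N M G p q hp hq]
  unfold pvLow
  ring

lemma pv_melt_val (N M : Int) (G : List (List Int)) {p q : Nat}
    (hp : p < N.toNat) (hq : q < M.toNat) :
    pvG (pvMelt N M G) p q = pvLow N M G p q := by
  have hinit : ((PySem.List.pyRange 0 N 1).map (fun _ => List.replicate M.toNat (0 : Int)))
      = List.replicate N.toNat (List.replicate M.toNat 0) := by
    rw [pv_pyRange_toNat N, PySem.List.pyRange_zero_natCast, List.map_map,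
      show ((fun _ => List.replicate M.toNat (0 : Int)) ∘ fun (k : Nat) => (k : Int))
          = (fun _ => List.replicate M.toNat (0 : Int)) from rfl,
      List.map_const']
    simp
  have hs0 : pvShape (List.replicate N.toNat (List.replicate M.toNat (0 : Int)))
      N.toNat M.toNat := by
    refine ⟨by simp, ?_⟩
    intro row hrow
    rw [List.eq_of_mem_replicate hrow]
    simp
  obtain ⟨_, hv⟩ := pv_outer_scat N M G rfl rfl hp hq (PySem.List.pyRange 0 N 1)
    (List.replicate N.toNat (List.replicate M.toNat 0)) hs0
  unfold pvMelt
  rw [hinit, hv]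
  have h00 : pvG (List.replicate N.toNat (List.replicate M.toNat (0 : Int))) p q = 0 := by
    unfold pvG
    rw [List.getD_replicate _ hp, List.getD_replicate _ hq]
  rw [h00, zero_add, pv_pyRange_toNat N, PySem.List.pyRange_zero_natCast, List.map_map]
  have hin : ∀ r : Nat,
      ((PySem.List.pyRange 0 M 1).map (fun c => pvCellAdd N M G (r : Int) c p q)).sum
        = ((List.range M.toNat).map (fun (c : Nat) => pvCellAdd N M G (r : Int) (c : Int) p q)).sum := by
    intro r
    rw [pv_pyRange_toNat M, PySem.List.pyRange_zero_natCast, List.map_map]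
    rfl
  refine Eq.trans ?_ (pv_sum_eq_low N M G hp hq)
  congr 1
  exact List.map_congr_left (fun r _ => hin r)

-- B = pointwise spec
lemma pvB (N M : Int) (G : List (List Int)) : timelapse_alt N M G = pvSpec N M G := by
  rw [pv_alt_eq, pv_pyRange_toNat N, PySem.List.pyRange_zero_natCast, List.map_map]
  unfold pvSpec
  apply List.map_congr_left
  intro r hr
  rw [List.mem_range] at hr
  show ((PySem.List.pyRange 0 M 1).map _) = _
  rw [pv_pyRange_toNat M, PySem.List.pyRange_zero_natCast, List.map_map]
  unfold pvRowOut
  apply List.map_congr_left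
  intro c hc
  rw [List.mem_range] at hc
  show (if PySem.List.pyGetD (PySem.List.pyGetD G (r : Int) []) (c : Int) 0 > 0 then
      max (PySem.List.pyGetD (PySem.List.pyGetD G (r : Int) []) (c : Int) 0
        - PySem.List.pyGetD (PySem.List.pyGetD (pvMelt N M G) (r : Int) []) (c : Int) 0) 0
    else 0) = pvF N M G r c
  have hm := pv_melt_val N M G hr hc
  unfold pvG at hm
  simp only [PySem.List.pyGetD_natCast]
  rw [hm]
  unfold pvF pvG
  rfl

-- ===== VERDICT (by name: the statement is the Claim_ definition above) =====
theorem timelapse_spec : Claim_equal_timelapse := by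
  intro N M G _ _
  unfold Spec_timelapse
  rw [pvA, pvB]
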